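-- pv_equiv track=rewrite | github.com/elazarcoh/IML_Hackaton | FeatureSelection.py | numOfIncreasingSeqs
-- ===== SOURCE A (Python) =====
-- def numOfIncreasingSeqs(vector, k):
--     """
--     :param vector:
--     :param k:
--     :return: number of increasing sequences of ones
--     """
--     if len(vector) < k:
--         return 0
--     vector = vector[-k:]
--     ones = []
--     counter = 0
--     for i in vector:
--         if i == 1:
--             counter += 1
--         else:
--             ones.append(counter)
--             counter = 0
--     counterForIncreasingSeq = 0
--     for i in range(len(ones) - 1):
--         if ones[i + 1] > ones[i]:
--             counterForIncreasingSeq += 1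
--     return counterForIncreasingSeq
-- ===== SOURCE B (Python) =====
-- def numOfIncreasingSeqs(vector, k):
--     """
--     :param vector:
--     :param k:
--     :return: number of increasing sequences of ones
--     """
--     if len(vector) < k:
--         return 0
--     current = 0
--     prev = None
--     result = 0
--     for i in vector[-k:]:
--         if i == 1:
--             current += 1
--         else:
--             if prev is not None and current > prev:
--                 result += 1
--             prev = current
--             current = 0
--     return result
-- ===== Notes on version B (the rewrite author's own statement) =====
-- stated objective: simpler
-- what changed: Replaces A's two passes (build the list of run lengths, then an indexed loop counting adjacent increases) with a single scan that keeps only the current run length, the previous completed run length and a counter.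
import Mathlib
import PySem

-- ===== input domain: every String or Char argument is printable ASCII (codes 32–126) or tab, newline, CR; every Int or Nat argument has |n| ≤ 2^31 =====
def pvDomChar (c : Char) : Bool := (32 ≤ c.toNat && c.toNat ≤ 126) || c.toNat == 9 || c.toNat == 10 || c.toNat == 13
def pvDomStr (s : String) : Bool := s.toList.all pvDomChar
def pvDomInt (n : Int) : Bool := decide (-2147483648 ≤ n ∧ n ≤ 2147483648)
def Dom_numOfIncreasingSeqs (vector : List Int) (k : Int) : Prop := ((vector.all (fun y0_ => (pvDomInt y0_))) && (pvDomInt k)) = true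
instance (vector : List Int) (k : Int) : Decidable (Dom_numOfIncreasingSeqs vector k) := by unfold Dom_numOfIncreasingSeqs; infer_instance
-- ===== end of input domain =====

-- B collapses A's two passes (build the list of run lengths, then count adjacent increases by index) into one scan keeping only the current run length, the last completed run length and a counter; objective: simpler.


-- ===== PORT A =====
-- A's first loop body: build 'ones' (completed run lengths) and the running 'counter'
def pvStepA (st : List Int × Int) (i : Int) : List Int × Int :=
  if i = 1 then (st.1, st.2 + 1) else (st.1 ++ [st.2], 0)

-- A's second loop body over indices i of 'ones'
def pvBodyA (ones : List Int) (acc : Int) (i : Int) : Int :=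
  if PySem.List.pyGetD ones (i + 1) 0 > PySem.List.pyGetD ones i 0 then acc + 1 else acc

def numOfIncreasingSeqs (vector : List Int) (k : Int) : Int :=
  if (vector.length : Int) < k then 0
  else
    let v := PySem.List.slice vector (some (-k)) none
    let ones := (v.foldl pvStepA ([], 0)).1
    (PySem.List.pyRange 0 ((ones.length : Int) - 1) 1).foldl (pvBodyA ones) 0

-- ===== PORT B =====
-- B's single-pass body: state = (current, prev, result), prev = none until a first run completes
def pvStepB (st : Int × Option Int × Int) (i : Int) : Int × Option Int × Int :=
  if i = 1 then (st.1 + 1, st.2.1, st.2.2)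
  else (0, some st.1,
        st.2.2 + (match st.2.1 with
                  | some p => if st.1 > p then 1 else 0
                  | none => 0))

def numOfIncreasingSeqs_alt (vector : List Int) (k : Int) : Int :=
  if (vector.length : Int) < k then 0
  else ((PySem.List.slice vector (some (-k)) none).foldl pvStepB (0, none, 0)).2.2

-- ===== PRECONDITION & SPEC =====
def Spec_numOfIncreasingSeqs (vector : List Int) (k : Int) (out : Int) : Prop := out = numOfIncreasingSeqs_alt vector k
instance (vector : List Int) (k : Int) (out : Int) : Decidable (Spec_numOfIncreasingSeqs vector k out) := by unfold Spec_numOfIncreasingSeqs; infer_instance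

-- ===== CLAIM (what is proved, stated in full; the proofs are below) =====
def Claim_equal_numOfIncreasingSeqs : Prop := ∀ (vector : List Int) (k : Int), Dom_numOfIncreasingSeqs vector k → Spec_numOfIncreasingSeqs vector k (numOfIncreasingSeqs vector k)

-- ===== LEMMAS AND PROOFS =====

-- number of adjacent increases in a list (the value A's second loop computes)
def pvInc : List Int → Int
  | [] => 0
  | [_] => 0
  | a :: b :: t => pvInc (b :: t) + (if b > a then 1 else 0)

lemma pvGetD_cons_succ (x : Int) (l : List Int) (i : Int) (h : 0 ≤ i) (d : Int) :
    PySem.List.pyGetD (x :: l) (i + 1) d = PySem.List.pyGetD l i d := by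
  obtain ⟨n, rfl⟩ := Int.eq_ofNat_of_zero_le h
  have : ((n : Int) + 1) = ((n + 1 : Nat) : Int) := by push_cast; ring
  rw [this, PySem.List.pyGetD_natCast, PySem.List.pyGetD_natCast]
  rfl

-- folding pvBodyA starts from any accumulator: it just adds
lemma pvBodyA_foldl_add (l : List Int) : ∀ (r : List Int) (acc : Int),
    r.foldl (pvBodyA l) acc = acc + r.foldl (pvBodyA l) 0 := by
  intro r
  induction r with
  | nil => simp
  | cons j r ih =>
    intro acc
    simp only [List.foldl_cons]
    rw [ih (pvBodyA l acc j), ih (pvBodyA l 0 j)]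
    unfold pvBodyA
    split_ifs <;> ring

-- index shift: dropping the head of the list shifts the index window by one
lemma pvBodyA_shift (x : Int) (l : List Int) : ∀ (n : Nat) (a acc : Int), 0 ≤ a →
    (PySem.List.pyRange (a + 1) (a + 1 + n) 1).foldl (pvBodyA (x :: l)) acc =
    (PySem.List.pyRange a (a + n) 1).foldl (pvBodyA l) acc := by
  intro n
  induction n with
  | zero =>
    intro a acc _
    rw [PySem.List.pyRange_one_eq_nil (by omega), PySem.List.pyRange_one_eq_nil (by omega)]
    rfl
  | succ m ih =>
    intro a acc ha
    conv_lhs => rw [PySem.List.pyRange_one_cons (by push_cast; omega)]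
    conv_rhs => rw [PySem.List.pyRange_one_cons (by push_cast; omega)]
    simp only [List.foldl_cons]
    have hb : pvBodyA (x :: l) acc (a + 1) = pvBodyA l acc a := by
      unfold pvBodyA
      rw [pvGetD_cons_succ x l a ha, show a + 1 + 1 = (a + 1) + 1 from rfl,
          pvGetD_cons_succ x l (a + 1) (by omega)]
    rw [hb]
    have h1 : a + 1 + (m + 1 : Nat) = (a + 1) + 1 + (m : Nat) := by push_cast; ring
    have h2 : a + (m + 1 : Nat) = (a + 1) + (m : Nat) := by push_cast; ring
    rw [h1, h2]
    exact ih (a + 1) (pvBodyA l acc a) (by omega)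

-- A's second loop computes pvInc
lemma pvBodyA_eq_pvInc : ∀ (ones : List Int),
    (PySem.List.pyRange 0 ((ones.length : Int) - 1) 1).foldl (pvBodyA ones) 0 = pvInc ones := by
  intro ones
  induction ones with
  | nil => rw [PySem.List.pyRange_one_eq_nil (by simp)]; rfl
  | cons a l ih =>
    cases l with
    | nil => rw [PySem.List.pyRange_one_eq_nil (by simp)]; rfl
    | cons b t =>
      have hlen : ((a :: b :: t).length : Int) - 1 = 0 + 1 + (t.length : Nat) := by
        simp; ring
      rw [hlen, PySem.List.pyRange_one_cons (by omega), List.foldl_cons]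
      have hb : pvBodyA (a :: b :: t) 0 0 = if b > a then 1 else 0 := by
        unfold pvBodyA
        rw [show (0 : Int) + 1 = ((1 : Nat) : Int) by norm_num,
            show (0 : Int) = ((0 : Nat) : Int) by norm_num,
            PySem.List.pyGetD_natCast, PySem.List.pyGetD_natCast]
        rfl
      rw [show (0 : Int) + 1 + (t.length : Nat) = 0 + 1 + (t.length : Nat) from rfl,
          pvBodyA_shift a (b :: t) t.length 0 _ (by omega)]
      have hlen2 : (0 : Int) + (t.length : Nat) = ((b :: t).length : Int) - 1 := by
        simp
      rw [hlen2, pvBodyA_foldl_add, ih, hb]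
      have hrec : pvInc (a :: b :: t) = pvInc (b :: t) + (if b > a then 1 else 0) := by
        cases t <;> rfl
      rw [hrec]
      ring

-- completing a run of length c: pvInc grows iff c exceeds the last completed run
lemma pvInc_concat : ∀ (ones : List Int) (c : Int),
    pvInc (ones ++ [c]) =
      pvInc ones + (match ones.getLast? with
                    | some p => if c > p then (1 : Int) else 0
                    | none => 0) := by
  intro ones
  induction ones with
  | nil => intro c; simp [pvInc]
  | cons a l ih =>
    intro c
    cases l with
    | nil => simp [pvInc]
    | cons b t =>
      have h1 : (a :: b :: t) ++ [c] = a :: ((b :: t) ++ [c]) := by simp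
      rw [h1]
      have h2 : pvInc (a :: ((b :: t) ++ [c])) = pvInc ((b :: t) ++ [c]) + (if b > a then 1 else 0) := by
        cases t <;> rfl
      rw [h2, ih c]
      have h3 : (a :: b :: t).getLast? = (b :: t).getLast? := by
        simp [List.getLast?_cons_cons]
      rw [show pvInc (a :: b :: t) = pvInc (b :: t) + (if b > a then 1 else 0) from rfl, h3]
      ring

-- main loop correspondence: B's single-pass state mirrors A's (ones, counter)
lemma pvLoop_corr : ∀ (v ones : List Int) (counter : Int),
    v.foldl pvStepB (counter, ones.getLast?, pvInc ones) =
      ((v.foldl pvStepA (ones, counter)).2,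
       (v.foldl pvStepA (ones, counter)).1.getLast?,
       pvInc (v.foldl pvStepA (ones, counter)).1) := by
  intro v
  induction v with
  | nil => intro ones counter; rfl
  | cons i v ih =>
    intro ones counter
    by_cases h : i = 1
    · simp only [List.foldl_cons, pvStepA, pvStepB, h]
      exact ih ones (counter + 1)
    · simp only [List.foldl_cons, pvStepA, pvStepB, if_neg h]
      have hlast : (ones ++ [counter]).getLast? = some counter := by
        simp
      have hinc := pvInc_concat ones counter
      have : (0 : Int) = (0 : Int) := rfl
      calc List.foldl pvStepB
            (0, some counter,
              pvInc ones + (match ones.getLast? with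
                            | some p => if counter > p then (1 : Int) else 0
                            | none => 0)) v
          = List.foldl pvStepB (0, (ones ++ [counter]).getLast?, pvInc (ones ++ [counter])) v := by
            rw [hlast, hinc]
        _ = _ := ih (ones ++ [counter]) 0

-- ===== VERDICT (by name: the statement is the Claim_ definition above) =====
theorem numOfIncreasingSeqs_spec : Claim_equal_numOfIncreasingSeqs := by
  intro vector k _
  unfold Spec_numOfIncreasingSeqs numOfIncreasingSeqs numOfIncreasingSeqs_alt
  by_cases h : (vector.length : Int) < k
  · simp [h]
  · simp only [h, if_false]
    set v := PySem.List.slice vector (some (-k)) none with hv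
    have := pvLoop_corr v [] 0
    simp only [List.getLast?_nil, pvInc] at this
    rw [this, pvBodyA_eq_pvInc]
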